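-- pv_equiv track=rewrite | github.com/zhao-ji/wordle-plug-in | utils.py | find_words_by_history_in_json
-- ===== SOURCE A (Python) =====
-- def find_words_by_history_in_json(history):
--     """
--     history := [
--         [
--             {
--                 char: 'a',
--                 status: 'absent'
--             },
--             {
--                 char: 'b',
--                 status: 'present'
--             },
--         ],
--         [
--             {
--                 char: 't',
--                 status: 'correct'
--             },
--             {
--                 char: 'b',
--                 status: 'present'
--             },
--         ],
--     ]
--     """
--     correct = {}
--     present = {}
--     absent = set()
--     for row in history:
--         for index, item in enumerate(row):
--             if item.get("status", "") == "correct":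
--                 correct[index + 1] = item["char"]
--             elif item.get("status", "") == "present":
--                 present.setdefault(item["char"], []).append(index+1)
--             elif item.get("status", "") == "absent":
--                 absent.add(item["char"])
--     return correct, present, "".join(absent)
-- ===== SOURCE B (Python) =====
-- def find_words_by_history_in_json(history):
--     # flatten once into (1-based position, item) pairs, then build each
--     # aggregate with its own selective pass over that flat list
--     tagged = [(index + 1, item)
--               for row in history for index, item in enumerate(row)]
--     correct = {pos: item["char"]
--                for pos, item in tagged if item.get("status", "") == "correct"}
--     present_hits = [(item["char"], pos)
--                     for pos, item in tagged if item.get("status", "") == "present"]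
--     present = {c: [] for c, _ in present_hits}
--     for c, pos in present_hits:
--         present[c].append(pos)
--     absent_chars = dict.fromkeys(
--         item["char"] for _, item in tagged if item.get("status", "") == "absent")
--     return correct, present, "".join(absent_chars)
-- ===== Notes on version B (the rewrite author's own statement) =====
-- stated objective: alternative
-- what changed: B flattens the history once into (position, item) pairs and builds each aggregate with its own selective pass (a dict comprehension for correct, a pre-keyed bucket table filled by a second pass for present, an ordered dedup for absent) instead of A's single nested loop dispatching on status; Pre_ excludes inputs where an item with status correct/present/absent lacks the 'char' key (A raises KeyError) and inputs with two or more distinct absent chars, where A's ''.join(set) order is a hash-seed accident (B joins in first-occurrence order).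
-- outside the precondition, e.g. on find_words_by_history_in_json([[{'status': 'correct'}]]): A raises KeyError, B raises KeyError
import Mathlib
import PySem

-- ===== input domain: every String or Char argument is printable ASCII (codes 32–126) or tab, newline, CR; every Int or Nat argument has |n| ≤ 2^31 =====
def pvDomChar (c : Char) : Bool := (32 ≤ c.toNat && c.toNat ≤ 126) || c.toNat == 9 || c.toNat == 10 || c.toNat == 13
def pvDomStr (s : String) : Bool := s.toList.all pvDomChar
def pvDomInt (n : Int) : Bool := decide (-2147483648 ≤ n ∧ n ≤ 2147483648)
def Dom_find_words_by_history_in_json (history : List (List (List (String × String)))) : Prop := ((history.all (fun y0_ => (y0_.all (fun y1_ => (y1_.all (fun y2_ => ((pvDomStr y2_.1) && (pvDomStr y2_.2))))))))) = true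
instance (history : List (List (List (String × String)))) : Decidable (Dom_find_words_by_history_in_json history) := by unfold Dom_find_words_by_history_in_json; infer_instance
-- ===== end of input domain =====

-- B flattens the history once and builds correct/present/absent with separate selective passes
-- (alternative decomposition, same cost); Pre_ excludes Python A's KeyError inputs and the inputs
-- (two or more distinct absent chars) where A's "".join(set) order depends on the hash seed.


-- ===== PORT A =====
-- item.get("status", "") and item["char"]; the latter is made total with default "" — exact on
-- Pre_, which excludes the KeyError inputs (an item with a matched status but no "char" key)
def pvStat (item : List (String × String)) : String := (PySem.Dict.mk item).getD "status" ""
def pvChar (item : List (String × String)) : String := (PySem.Dict.mk item).getD "char" ""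

def pvStepA (st : PySem.Dict Int String × PySem.Dict String (List Int) × PySem.Set String)
    (pr : Int × List (String × String)) :
    PySem.Dict Int String × PySem.Dict String (List Int) × PySem.Set String :=
  if pvStat pr.2 == "correct" then (st.1.insert (pr.1 + 1) (pvChar pr.2), st.2.1, st.2.2)
  else if pvStat pr.2 == "present" then
    (st.1, st.2.1.modify (pvChar pr.2) [] (· ++ [pr.1 + 1]), st.2.2)
  else if pvStat pr.2 == "absent" then (st.1, st.2.1, st.2.2.add (pvChar pr.2))
  else st

def find_words_by_history_in_json (history : List (List (List (String × String)))) : (List (Int × String)) × (List (String × List Int)) × String :=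
  let fin := history.foldl (fun st row => (PySem.List.enumerate row).foldl pvStepA st)
    ((PySem.Dict.empty : PySem.Dict Int String), (PySem.Dict.empty : PySem.Dict String (List Int)),
      (PySem.Set.empty : PySem.Set String))
  (fin.1.items, fin.2.1.items, PySem.Str.join "" fin.2.2)

-- ===== PORT B =====
def find_words_by_history_in_json_alt (history : List (List (List (String × String)))) : (List (Int × String)) × (List (String × List Int)) × String :=
  let tagged : List (Int × List (String × String)) :=
    history.flatMap (fun row => (PySem.List.enumerate row).map (fun pr => (pr.1 + 1, pr.2)))
  let correct : PySem.Dict Int String :=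
    (tagged.filter (fun t => pvStat t.2 == "correct")).foldl
      (fun d t => d.insert t.1 (pvChar t.2)) PySem.Dict.empty
  let presentHits : List (String × Int) :=
    (tagged.filter (fun t => pvStat t.2 == "present")).map (fun t => (pvChar t.2, t.1))
  let present : PySem.Dict String (List Int) :=
    presentHits.foldl (fun d h => d.modify h.1 [] (· ++ [h.2]))
      (presentHits.foldl (fun d h => d.insert h.1 ([] : List Int)) PySem.Dict.empty)
  let absentChars : List String :=
    PySem.List.dedup ((tagged.filter (fun t => pvStat t.2 == "absent")).map (fun t => pvChar t.2))
  (correct.items, present.items, PySem.Str.join "" absentChars)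


-- ===== PRECONDITION & SPEC =====
-- Pre_ excludes (a) inputs where an item whose status is correct/present/absent lacks the
-- "char" key — Python A raises KeyError there — and (b) inputs with two or more distinct
-- absent chars, on which the order of A's "".join(set) is an accident of the interpreter's
-- hash seed (B joins in first-occurrence order there).
def Pre_find_words_by_history_in_json (history : List (List (List (String × String)))) : Prop :=
  (∀ row ∈ history, ∀ item ∈ row,
      (pvStat item = "correct" ∨ pvStat item = "present" ∨ pvStat item = "absent") →
        (PySem.Dict.mk item).contains "char" = true) ∧
  (PySem.List.dedup ((history.flatMap id).filterMap
      (fun item => if pvStat item = "absent" then some (pvChar item) else none))).length ≤ 1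
instance (history : List (List (List (String × String)))) : Decidable (Pre_find_words_by_history_in_json history) := by unfold Pre_find_words_by_history_in_json; infer_instance

def pvWitness_find_words_by_history_in_json : (List (List (List (String × String)))) :=
  [[[("char", "t"), ("status", "correct")], [("char", "b"), ("status", "present")]],
   [[("char", "a"), ("status", "absent")]]]

def Spec_find_words_by_history_in_json (history : List (List (List (String × String)))) (out : (List (Int × String)) × (List (String × List Int)) × String) : Prop := out = find_words_by_history_in_json_alt history
instance (history : List (List (List (String × String)))) (out : (List (Int × String)) × (List (String × List Int)) × String) : Decidable (Spec_find_words_by_history_in_json history out) := by unfold Spec_find_words_by_history_in_json; infer_instance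

-- ===== CLAIM (what is proved, stated in full; the proofs are below) =====
def Claim_equal_find_words_by_history_in_json : Prop := ∀ (history : List (List (List (String × String)))), Dom_find_words_by_history_in_json history → Pre_find_words_by_history_in_json history → Spec_find_words_by_history_in_json history (find_words_by_history_in_json history)

-- ===== LEMMAS AND PROOFS =====

-- component step functions
def pvFc (d : PySem.Dict Int String) (t : Int × List (String × String)) : PySem.Dict Int String :=
  if pvStat t.2 == "correct" then d.insert t.1 (pvChar t.2) else d
def pvFp (d : PySem.Dict String (List Int)) (t : Int × List (String × String)) : PySem.Dict String (List Int) :=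
  if pvStat t.2 == "present" then d.modify (pvChar t.2) [] (· ++ [t.1]) else d
def pvFs (s : PySem.Set String) (t : Int × List (String × String)) : PySem.Set String :=
  if pvStat t.2 == "absent" then s.add (pvChar t.2) else s

theorem pvStepA_eq (st : PySem.Dict Int String × PySem.Dict String (List Int) × PySem.Set String)
    (pr : Int × List (String × String)) :
    pvStepA st pr = (pvFc st.1 (pr.1 + 1, pr.2), pvFp st.2.1 (pr.1 + 1, pr.2), pvFs st.2.2 (pr.1 + 1, pr.2)) := by
  simp only [pvStepA, pvFc, pvFp, pvFs]
  by_cases h1 : pvStat pr.2 = "correct" <;>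
    by_cases h2 : pvStat pr.2 = "present" <;>
      by_cases h3 : pvStat pr.2 = "absent" <;>
        simp_all

-- update of a set by its own members
theorem pv_update_self {xs : List String} {s : PySem.Set String} (h : ∀ x ∈ xs, x ∈ s) :
    PySem.Set.update s xs = s := by
  induction xs generalizing s with
  | nil => rfl
  | cons x xs ih =>
    have hx : PySem.Set.add s x = s := by
      simp [PySem.Set.add, PySem.Set.contains]
      exact h x (by simp)
    show PySem.Set.update s (x :: xs) = s
    simp only [PySem.Set.update, List.foldl_cons] at *
    rw [hx]
    exact ih (fun y hy => h y (by simp [hy]))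

theorem pv_getD_init (l : List (String × Int)) (c : String) :
    (l.foldl (fun d h => d.insert h.1 ([] : List Int)) PySem.Dict.empty).getD c [] = [] := by
  suffices H : ∀ d : PySem.Dict String (List Int), d.getD c [] = [] →
      (l.foldl (fun d h => d.insert h.1 ([] : List Int)) d).getD c [] = [] by
    exact H _ (by simp [pysem])
  induction l with
  | nil => intro d hd; exact hd
  | cons x xs ih =>
    intro d hd
    refine ih _ ?_
    rw [PySem.Dict.getD_insert]
    split <;> simp [hd]

theorem pv_present_eq (l : List (String × Int)) :
    l.foldl (fun d h => d.modify h.1 [] (· ++ [h.2])) PySem.Dict.empty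
      = l.foldl (fun d h => d.modify h.1 [] (· ++ [h.2]))
          (l.foldl (fun d h => d.insert h.1 ([] : List Int)) PySem.Dict.empty) := by
  apply PySem.Dict.ext
  have hka : (l.foldl (fun d h => d.modify h.1 [] (· ++ [h.2])) PySem.Dict.empty).keys
      = PySem.Set.ofList (l.map (·.1)) := by
    rw [PySem.Dict.keys_foldl_modify_key l (·.1) ([] : List Int) (fun _ h => (· ++ [h.2]))]
    simp [PySem.Set.update_nil_left, PySem.Dict.keys_empty]
  have hki : (l.foldl (fun d h => d.insert h.1 ([] : List Int)) PySem.Dict.empty).keys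
      = PySem.Set.ofList (l.map (·.1)) := by
    rw [PySem.Dict.keys_foldl_insert_key l (·.1) (fun _ _ => ([] : List Int))]
    simp [PySem.Set.update_nil_left, PySem.Dict.keys_empty]
  have hkb : (l.foldl (fun d h => d.modify h.1 [] (· ++ [h.2]))
        (l.foldl (fun d h => d.insert h.1 ([] : List Int)) PySem.Dict.empty)).keys
      = PySem.Set.ofList (l.map (·.1)) := by
    rw [PySem.Dict.keys_foldl_modify_key l (·.1) ([] : List Int) (fun _ h => (· ++ [h.2])), hki]
    exact pv_update_self (fun x hx => (PySem.Set.mem_ofList _ _).2 hx)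
  have hna : (l.foldl (fun d h => d.modify h.1 [] (· ++ [h.2])) PySem.Dict.empty).keys.Nodup := by
    apply PySem.Dict.nodup_keys_foldl_modify_key l (·.1) ([] : List Int) (fun _ h => (· ++ [h.2]))
    simp [PySem.Dict.keys_empty]
  have hnb : (l.foldl (fun d h => d.modify h.1 [] (· ++ [h.2]))
        (l.foldl (fun d h => d.insert h.1 ([] : List Int)) PySem.Dict.empty)).keys.Nodup := by
    apply PySem.Dict.nodup_keys_foldl_modify_key l (·.1) ([] : List Int) (fun _ h => (· ++ [h.2]))
    apply PySem.Dict.nodup_keys_foldl_insert_key l (·.1) (fun _ _ => ([] : List Int))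
    simp [PySem.Dict.keys_empty]
  rw [PySem.Dict.items_eq_map_keys _ hna ([] : List Int),
      PySem.Dict.items_eq_map_keys _ hnb ([] : List Int), hka, hkb]
  refine List.map_congr_left (fun k _ => ?_)
  rw [PySem.Dict.getD_foldl_modify_append, PySem.Dict.getD_foldl_modify_append,
      pv_getD_init]
  simp [pysem]

theorem pv_correct_comp (L : List (Int × List (String × String))) :
    L.foldl pvFc PySem.Dict.empty
      = (L.filter (fun t => pvStat t.2 == "correct")).foldl
          (fun d t => d.insert t.1 (pvChar t.2)) PySem.Dict.empty := by
  rw [List.foldl_filter]; rfl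

theorem pv_present_comp (L : List (Int × List (String × String))) :
    L.foldl pvFp PySem.Dict.empty
      = ((L.filter (fun t => pvStat t.2 == "present")).map (fun t => (pvChar t.2, t.1))).foldl
          (fun d h => d.modify h.1 [] (· ++ [h.2]))
          (((L.filter (fun t => pvStat t.2 == "present")).map (fun t => (pvChar t.2, t.1))).foldl
            (fun d h => d.insert h.1 ([] : List Int)) PySem.Dict.empty) := by
  rw [← pv_present_eq, List.foldl_map, List.foldl_filter]; rfl

theorem pv_absent_comp (L : List (Int × List (String × String))) :
    L.foldl pvFs PySem.Set.empty
      = PySem.List.dedup ((L.filter (fun t => pvStat t.2 == "absent")).map (fun t => pvChar t.2)) := by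
  simp only [PySem.List.dedup_eq_ofList, PySem.Set.ofList_eq_foldl, List.foldl_map,
    List.foldl_filter]
  rfl

theorem pv_main (history : List (List (List (String × String)))) :
    find_words_by_history_in_json history = find_words_by_history_in_json_alt history := by
  unfold find_words_by_history_in_json find_words_by_history_in_json_alt
  have hrow : ∀ (st : PySem.Dict Int String × PySem.Dict String (List Int) × PySem.Set String)
      (row : List (List (String × String))),
      (PySem.List.enumerate row).foldl pvStepA st =
        ((PySem.List.enumerate row).map (fun pr => (pr.1 + 1, pr.2))).foldl
          (fun s e => (pvFc s.1 e,
            (fun (q : PySem.Dict String (List Int) × PySem.Set String) e => (pvFp q.1 e, pvFs q.2 e)) s.2 e)) st := by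
    intro st row
    rw [List.foldl_map]
    exact List.foldl_ext _ _ st (fun a pr _ => pvStepA_eq a pr)
  simp only [hrow]
  rw [← List.foldl_flatMap,
    PySem.List.foldl_prod_mk pvFc
      (fun (q : PySem.Dict String (List Int) × PySem.Set String) e => (pvFp q.1 e, pvFs q.2 e)),
    PySem.List.foldl_prod_mk pvFp pvFs]
  simp only [pv_correct_comp, pv_present_comp, pv_absent_comp]

-- ===== VERDICT (by name: the statement is the Claim_ definition above) =====
theorem find_words_by_history_in_json_spec : Claim_equal_find_words_by_history_in_json := by
  intro history _ _
  unfold Spec_find_words_by_history_in_json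
  exact pv_main history
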